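-- pv_equiv track=rewrite | github.com/3136Saurav/Competitive_problems | venv/alternate_GP.py | gp
-- ===== SOURCE A (Python) =====
-- def gp(n,r1,r2):
--     list1=[1,1]
--     a=1
--     b=1
--     if n==1:
--         return [1]
--     elif n==2:
--         return list1
--     else:
--         for i in range(3,n+1):
--             if i%2!=0:
--                 list1.append(a*r1)
--                 a*=r1
--             else:
--                 list1.append(b * r2)
--                 b *= r2
--
--     return list1
-- ===== SOURCE B (Python) =====
-- def _powers(r, k):
--     out = []
--     p = 1
--     for _ in range(k):
--         p *= r
--         out.append(p)
--     return out
--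
-- def gp(n, r1, r2):
--     if n == 1:
--         return [1]
--     ko = max(0, (n - 1) // 2)   # odd positions in 3..n
--     ke = max(0, (n - 2) // 2)   # even positions in 3..n
--     odds = _powers(r1, ko)
--     evens = _powers(r2, ke)
--     res = [1, 1]
--     for x, y in zip(odds, evens):
--         res.append(x)
--         res.append(y)
--     if ko > ke:
--         res.append(odds[-1])
--     return res
-- ===== Notes on version B (the rewrite author's own statement) =====
-- stated objective: alternative
-- what changed: A fills one list in a single loop that branches on index parity while carrying two running multipliers; B counts the odd and even slots with closed-form arithmetic, builds the two power lists independently, and assembles the result by zipping and flattening them with a possible leftover odd term.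
import Mathlib
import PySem

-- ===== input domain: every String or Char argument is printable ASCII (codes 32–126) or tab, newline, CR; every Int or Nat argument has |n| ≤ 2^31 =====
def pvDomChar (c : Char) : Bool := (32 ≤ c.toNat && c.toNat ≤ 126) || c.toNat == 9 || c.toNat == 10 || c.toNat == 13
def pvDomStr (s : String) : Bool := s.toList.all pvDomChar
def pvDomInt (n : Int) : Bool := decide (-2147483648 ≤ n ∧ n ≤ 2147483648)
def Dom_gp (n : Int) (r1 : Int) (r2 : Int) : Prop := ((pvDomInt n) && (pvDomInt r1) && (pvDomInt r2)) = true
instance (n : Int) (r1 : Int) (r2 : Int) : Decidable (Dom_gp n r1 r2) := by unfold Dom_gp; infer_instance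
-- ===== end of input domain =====

-- B replaces A's single parity-branching loop by counting the odd/even slots, building the
-- two power lists separately and interleaving them (objective: alternative decomposition).

-- ===== PORT A =====
-- loop body of A's for-loop: state = (list1, a, b)
def gpStep (r1 r2 : Int) (st : List Int × Int × Int) (i : Int) : List Int × Int × Int :=
  if PySem.Int.mod i 2 ≠ 0 then (st.1 ++ [st.2.1 * r1], st.2.1 * r1, st.2.2)
  else (st.1 ++ [st.2.2 * r2], st.2.1, st.2.2 * r2)

def gp (n : Int) (r1 : Int) (r2 : Int) : List Int :=
  if n = 1 then [1]
  else if n = 2 then [1, 1]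
  else ((PySem.List.pyRange 3 (n + 1) 1).foldl (gpStep r1 r2) ([1, 1], 1, 1)).1

-- ===== PORT B =====
-- helper _powers: running-product list [r, r^2, ..., r^k], state = (out, p)
def powers (r : Int) (k : Int) : List Int :=
  ((PySem.List.pyRange 0 k 1).foldl
    (fun (st : List Int × Int) _ => (st.1 ++ [st.2 * r], st.2 * r)) ([], 1)).1

def gp_alt (n : Int) (r1 : Int) (r2 : Int) : List Int :=
  if n = 1 then [1]
  else
    let ko := max 0 (PySem.Int.floordiv (n - 1) 2)
    let ke := max 0 (PySem.Int.floordiv (n - 2) 2)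
    let odds := powers r1 ko
    let evens := powers r2 ke
    let res := (odds.zip evens).foldl (fun acc p => acc ++ [p.1, p.2]) [1, 1]
    -- odds[-1]: odds is nonempty whenever ko > ke, so the default is never used
    if ko > ke then res ++ [PySem.List.pyGetD odds (-1) 0] else res

-- ===== PRECONDITION & SPEC =====
def Spec_gp (n : Int) (r1 : Int) (r2 : Int) (out : List Int) : Prop := out = gp_alt n r1 r2
instance (n : Int) (r1 : Int) (r2 : Int) (out : List Int) : Decidable (Spec_gp n r1 r2 out) := by unfold Spec_gp; infer_instance

-- ===== CLAIM (what is proved, stated in full; the proofs are below) =====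
def Claim_equal_gp : Prop := ∀ (n : Int) (r1 : Int) (r2 : Int), Dom_gp n r1 r2 → Spec_gp n r1 r2 (gp n r1 r2)

-- ===== LEMMAS AND PROOFS =====

-- B's power lists and else-branch result as functions of the two counts (proof-side helpers)
def powList (r : Int) (k : Int) : List Int :=
  (PySem.List.pyRange 1 (k + 1) 1).map (fun j => r ^ j.toNat)

def altBody (r1 r2 : Int) (ko ke : Int) : List Int :=
  ((powList r1 ko).zip (powList r2 ke)).foldl (fun acc p => acc ++ [p.1, p.2]) [1, 1]
    ++ (if ko > ke then [PySem.List.pyGetD (powList r1 ko) (-1) 0] else [])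

lemma powList_succ (r : Int) (k : Nat) :
    powList r ((k : Int) + 1) = powList r k ++ [r ^ (k + 1)] := by
  unfold powList
  rw [show ((k : Int) + 1 + 1) = ((k : Int) + 1) + 1 by ring,
      PySem.List.pyRange_one_succ_right (by omega)]
  simp

lemma powers_state (r : Int) (k : Nat) :
    (PySem.List.pyRange 0 (k : Int) 1).foldl
      (fun (st : List Int × Int) _ => (st.1 ++ [st.2 * r], st.2 * r)) ([], 1)
      = (powList r k, r ^ k) := by
  induction k with
  | zero =>
      rw [show ((0 : Nat) : Int) = 0 by norm_num, PySem.List.pyRange_one_eq_nil (by omega)]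
      simp [powList, PySem.List.pyRange_one_eq_nil]
  | succ k ih =>
      rw [show ((k + 1 : Nat) : Int) = ((k : Int)) + 1 by push_cast; ring,
          PySem.List.pyRange_one_succ_right (by omega), List.foldl_append, ih,
          show ((k : Int)) + 1 = (((k + 1 : Nat) : Int)) by push_cast; ring]
      rw [show (((k + 1 : Nat) : Int)) = ((k : Int)) + 1 by push_cast; ring, powList_succ]
      simp [pow_succ]

lemma powers_eq_powList (r : Int) (m : Int) (h : 0 ≤ m) : powers r m = powList r m := by
  have := powers_state r m.toNat
  rw [show ((m.toNat : Nat) : Int) = m by omega] at this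
  rw [powers, this]

lemma gp_alt_eq (n r1 r2 : Int) (h : ¬ n = 1) :
    gp_alt n r1 r2 =
      altBody r1 r2 (max 0 (PySem.Int.floordiv (n - 1) 2)) (max 0 (PySem.Int.floordiv (n - 2) 2)) := by
  simp only [gp_alt, if_neg h]
  rw [powers_eq_powList _ _ (le_max_left _ _), powers_eq_powList _ _ (le_max_left _ _)]
  simp only [altBody]
  split_ifs <;> simp

lemma powList_length (r : Int) (k : Nat) : (powList r k).length = k := by
  simp [powList, PySem.List.length_pyRange_one]

lemma altBody_odd_step (r1 r2 : Int) (k : Nat) :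
    altBody r1 r2 ((k : Int) + 1) k = altBody r1 r2 k k ++ [r1 ^ (k + 1)] := by
  unfold altBody
  rw [powList_succ]
  have hlen : (powList r1 k).length = (powList r2 k).length := by
    rw [powList_length, powList_length]
  rw [show (powList r2 (k : Int)) = powList r2 k ++ [] by simp, List.zip_append hlen]
  simp [PySem.List.pyGetD_neg_one_append_singleton]

lemma altBody_even_step (r1 r2 : Int) (k : Nat) :
    altBody r1 r2 ((k : Int) + 1) ((k : Int) + 1)
      = altBody r1 r2 ((k : Int) + 1) k ++ [r2 ^ (k + 1)] := by
  unfold altBody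
  rw [powList_succ, powList_succ]
  have hlen : (powList r1 k).length = (powList r2 k).length := by
    rw [powList_length, powList_length]
  have htrunc : (powList r1 k ++ [r1 ^ (k + 1)]).zip (powList r2 k)
      = (powList r1 k).zip (powList r2 k) := by
    rw [show (powList r2 (k : Int)) = powList r2 k ++ [] by simp, List.zip_append hlen]; simp
  rw [List.zip_append hlen, htrunc]
  simp [PySem.List.pyGetD_neg_one_append_singleton]

-- A's loop invariant: after the iterations 3 .. m+2 the accumulated list is B's body for
-- the counts so far, and (a, b) are the corresponding running powers
lemma gp_fold_inv (r1 r2 : Int) (m : Nat) :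
    (PySem.List.pyRange 3 ((m : Int) + 3) 1).foldl (gpStep r1 r2) ([1, 1], 1, 1)
      = (altBody r1 r2 (((m + 1) / 2 : Nat) : Int) (((m / 2 : Nat) : Nat) : Int),
         r1 ^ ((m + 1) / 2), r2 ^ (m / 2)) := by
  induction m with
  | zero =>
      rw [show ((0 : Nat) : Int) + 3 = 3 by norm_num, PySem.List.pyRange_one_eq_nil (by omega)]
      simp [altBody, powList, PySem.List.pyRange_one_eq_nil]
  | succ m ih =>
      rw [show (((m + 1 : Nat)) : Int) + 3 = ((m : Int) + 3) + 1 by push_cast; ring,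
          PySem.List.pyRange_one_succ_right (by omega), List.foldl_append, ih]
      simp only [List.foldl_cons, List.foldl_nil, gpStep]
      rw [PySem.Int.mod_eq_emod_of_pos (by omega)]
      obtain ⟨t, ht | ht⟩ := Nat.even_or_odd' m
      · -- m = 2t, i = 2t + 3 is odd
        subst ht
        rw [if_pos (by omega)]
        rw [show (2 * t + 1) / 2 = t from by omega, show (2 * t) / 2 = t from by omega,
            show (2 * t + 1 + 1) / 2 = t + 1 from by omega,
            show ((t + 1 : Nat) : Int) = (t : Int) + 1 from by push_cast; ring, altBody_odd_step]
        simp [pow_succ]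
      · -- m = 2t + 1, i = 2t + 4 is even
        subst ht
        rw [if_neg (by omega)]
        rw [show (2 * t + 1 + 1 + 1) / 2 = t + 1 from by omega,
            show (2 * t + 1 + 1) / 2 = t + 1 from by omega,
            show (2 * t + 1) / 2 = t from by omega,
            show ((t + 1 : Nat) : Int) = (t : Int) + 1 from by push_cast; ring, altBody_even_step]
        simp [pow_succ]

-- ===== VERDICT (by name: the statement is the Claim_ definition above) =====
theorem gp_spec : Claim_equal_gp := by
  intro n r1 r2 _
  unfold Spec_gp
  by_cases h1 : n = 1
  · simp [gp, gp_alt, h1]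
  rw [gp_alt_eq n r1 r2 h1]
  rw [PySem.Int.floordiv_eq_ediv_of_pos (by omega), PySem.Int.floordiv_eq_ediv_of_pos (by omega)]
  by_cases h2 : n ≤ 2
  · have hko : max 0 ((n - 1) / 2) = ((((0:Nat) + 1) / 2 : Nat) : Int) := by simp; omega
    have hke : max 0 ((n - 2) / 2) = (((0:Nat) / 2 : Nat) : Int) := by simp; omega
    rw [hko, hke]
    by_cases h3 : n = 2
    · simp [gp, h3, altBody, powList, PySem.List.pyRange_one_eq_nil]
    · rw [show gp n r1 r2 = ((PySem.List.pyRange 3 (n + 1) 1).foldl (gpStep r1 r2) ([1, 1], 1, 1)).1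
            by simp [gp, h1, h3],
          PySem.List.pyRange_one_eq_nil (by omega)]
      simp [altBody, powList, PySem.List.pyRange_one_eq_nil]
  · -- n ≥ 3
    have hn : 3 ≤ n := by omega
    have hm : ((n - 2).toNat : Int) + 3 = n + 1 := by omega
    rw [show gp n r1 r2 = ((PySem.List.pyRange 3 (n + 1) 1).foldl (gpStep r1 r2) ([1, 1], 1, 1)).1
          by simp [gp, h1]; omega,
        ← hm, gp_fold_inv]
    have hko : ((((n - 2).toNat + 1) / 2 : Nat) : Int) = max 0 ((n - 1) / 2) := by
      rw [max_eq_right (by omega)]; omega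
    have hke : (((n - 2).toNat / 2 : Nat) : Int) = max 0 ((n - 2) / 2) := by
      rw [max_eq_right (by omega)]; omega
    rw [hko, hke]
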